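-- pv_equiv track=rewrite | github.com/birkirRU/B_hluti | æfingar/V1/1.1_Lokaspurning_H1_A.py | dagar_ad_arsbyrjun
-- ===== SOURCE A (Python) =====
-- def hlaupaar(ar):
--     if ar%4==0:
--         hlar=True
--     else:
--         hlar=False
--     if ar%100==0:
--         hlar=False
--     if ar%400==0:
--         hlar=True
--     return hlar
--
-- def dagar_ad_arsbyrjun(ar):
--     dagar = 1
--     fjoldi_ara = ar - 1900
--
--     for i in range(fjoldi_ara):
--         if hlaupaar(1900 + i):
--             dagar+= 366
--         else:
--             dagar+=365
--
--     return dagar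
-- ===== SOURCE B (Python) =====
-- def dagar_ad_arsbyrjun(ar):
--     # Closed form: 1 + 365*(years since 1900) + number of leap years in [1900, ar)
--     n = ar - 1900
--     if n <= 0:
--         return 1
--     L = lambda y: y // 4 - y // 100 + y // 400
--     return 1 + 365 * n + L(ar - 1) - L(1899)
-- ===== Notes on version B (the rewrite author's own statement) =====
-- stated objective: faster
-- what changed: Replaced the per-year loop over range(ar-1900) with a closed-form formula counting leap years by floor-division arithmetic.
import Mathlib
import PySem

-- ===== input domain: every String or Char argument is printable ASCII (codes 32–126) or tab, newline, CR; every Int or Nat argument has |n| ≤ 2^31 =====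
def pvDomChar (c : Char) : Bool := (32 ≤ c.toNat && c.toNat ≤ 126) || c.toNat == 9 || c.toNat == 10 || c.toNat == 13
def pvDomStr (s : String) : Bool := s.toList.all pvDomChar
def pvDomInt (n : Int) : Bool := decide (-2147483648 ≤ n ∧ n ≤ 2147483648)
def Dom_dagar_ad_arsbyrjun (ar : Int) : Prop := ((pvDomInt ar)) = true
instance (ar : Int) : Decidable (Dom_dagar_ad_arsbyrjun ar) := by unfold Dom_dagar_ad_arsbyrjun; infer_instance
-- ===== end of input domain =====

-- B replaces A's per-year loop with a closed-form leap-year count (objective: faster, O(1) vs O(n)).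

-- ===== PORT A =====
def hlaupaar (ar : Int) : Bool :=
  let hlar := PySem.Int.mod ar 4 == 0
  let hlar := if PySem.Int.mod ar 100 == 0 then false else hlar
  let hlar := if PySem.Int.mod ar 400 == 0 then true else hlar
  hlar

def dagar_ad_arsbyrjun (ar : Int) : Int :=
  (PySem.List.pyRange 0 (ar - 1900) 1).foldl
    (fun dagar i => if hlaupaar (1900 + i) then dagar + 366 else dagar + 365) 1

-- ===== PORT B =====
def leapsUpTo (y : Int) : Int :=
  PySem.Int.floordiv y 4 - PySem.Int.floordiv y 100 + PySem.Int.floordiv y 400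

def dagar_ad_arsbyrjun_alt (ar : Int) : Int :=
  let n := ar - 1900
  if n ≤ 0 then 1
  else 1 + 365 * n + leapsUpTo (ar - 1) - leapsUpTo 1899

-- ===== PRECONDITION & SPEC =====
def Spec_dagar_ad_arsbyrjun (ar : Int) (out : Int) : Prop := out = dagar_ad_arsbyrjun_alt ar
instance (ar : Int) (out : Int) : Decidable (Spec_dagar_ad_arsbyrjun ar out) := by unfold Spec_dagar_ad_arsbyrjun; infer_instance

-- ===== CLAIM (what is proved, stated in full; the proofs are below) =====
def Claim_equal_dagar_ad_arsbyrjun : Prop := ∀ (ar : Int), Dom_dagar_ad_arsbyrjun ar → Spec_dagar_ad_arsbyrjun ar (dagar_ad_arsbyrjun ar)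

-- ===== LEMMAS AND PROOFS =====

-- one loop-body step adds 365 plus the leap-count increment at year y
theorem step_eq (d y : Int) :
    (if hlaupaar y then d + 366 else d + 365) = d + 365 + (leapsUpTo y - leapsUpTo (y - 1)) := by
  unfold hlaupaar leapsUpTo
  rw [PySem.Int.mod_eq_emod_of_pos (a := y) (b := 4) (by norm_num),
      PySem.Int.mod_eq_emod_of_pos (a := y) (b := 100) (by norm_num),
      PySem.Int.mod_eq_emod_of_pos (a := y) (b := 400) (by norm_num),
      PySem.Int.floordiv_eq_ediv_of_pos (a := y) (b := 4) (by norm_num),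
      PySem.Int.floordiv_eq_ediv_of_pos (a := y) (b := 100) (by norm_num),
      PySem.Int.floordiv_eq_ediv_of_pos (a := y) (b := 400) (by norm_num),
      PySem.Int.floordiv_eq_ediv_of_pos (a := y - 1) (b := 4) (by norm_num),
      PySem.Int.floordiv_eq_ediv_of_pos (a := y - 1) (b := 100) (by norm_num),
      PySem.Int.floordiv_eq_ediv_of_pos (a := y - 1) (b := 400) (by norm_num)]
  split_ifs <;> simp_all [beq_iff_eq] <;> omega

theorem loop_eq (n : Nat) :
    (PySem.List.pyRange 0 (n : Int) 1).foldl
      (fun dagar i => if hlaupaar (1900 + i) then dagar + 366 else dagar + 365) 1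
    = 1 + 365 * (n : Int) + leapsUpTo (1899 + n) - leapsUpTo 1899 := by
  induction n with
  | zero => simp [PySem.List.pyRange_one_eq_nil]
  | succ m ih =>
      have h : ((m + 1 : Nat) : Int) = (m : Int) + 1 := by push_cast; ring
      rw [h, PySem.List.pyRange_one_succ_right (a := 0) (b := (m : Int)) (by positivity),
          List.foldl_append, ih]
      simp only [List.foldl_cons, List.foldl_nil]
      rw [step_eq]
      have e1 : (1900 : Int) + (m : Int) - 1 = 1899 + (m : Int) := by ring
      have e2 : (1899 : Int) + ((m : Int) + 1) = 1900 + (m : Int) := by ring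
      rw [e1, e2]
      ring

-- ===== VERDICT (by name: the statement is the Claim_ definition above) =====
theorem dagar_ad_arsbyrjun_spec : Claim_equal_dagar_ad_arsbyrjun := by
  intro ar _
  unfold Spec_dagar_ad_arsbyrjun dagar_ad_arsbyrjun dagar_ad_arsbyrjun_alt
  by_cases hle : ar - 1900 ≤ 0
  · rw [PySem.List.pyRange_one_eq_nil (a := 0) (b := ar - 1900) (by omega)]
    simp [hle]
  · have hn : ((ar - 1900).toNat : Int) = ar - 1900 := by omega
    rw [← hn, loop_eq]
    have h1899 : (1899 : Int) + ((ar - 1900).toNat : Int) = ar - 1 := by omega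
    rw [h1899]
    dsimp only
    rw [if_neg (by omega)]
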